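-- pv_equiv track=rewrite | github.com/jramaswami/Binary_Search_Python | connected_roads_to_destination.py | solve
-- ===== SOURCE A (Python) =====
-- class UnionFind:
--
--     def __init__(self):
--         self.id = dict()
--         self.size = dict()
--
--     def add(self, x, y):
--         if (x, y) not in self.id:
--             self.id[(x, y)] = (x, y)
--             self.size[(x, y)] = 1
--
--     def find(self, u):
--         p = self.id[u]
--         if p != u:
--             self.id[u] = self.find(self.find(p))
--         return self.id[u]
--
--     def union(self, u, v):
--         if u not in self.id or v not in self.id:
--             return
--         u = self.find(u)
--         v = self.find(v)
--         if u != v: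
--             if self.size[u] < self.size[v]:
--                 u, v, = v, u
--             self.id[v] = u
--             self.size[u] += self.size[v]
--
--     def is_connected(self, u, v):
--         return self.find(u) == self.find(v)
--
-- def solve(sx, sy, ex, ey, roads):
--     # Boundary case: (sx, sy) and (ex, ey) are equal or adjacent.
--     dist = pow(sx - ex, 2) + pow(sy - ey, 2)
--     if dist <= 1:
--         return 0
--
--     uf = UnionFind()
--     uf.add(sx, sy)
--     uf.add(ex, ey)
--
--     source = (sx, sy)
--     dest = (ex, ey)
--     offsets = [(0, 1), (0, -1), (1, 0), (-1, 0)]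
--     soln = 0
--     for x, y in roads:
--         uf.add(x, y)
--         soln += 1
--         for dx, dy in offsets:
--             uf.union((x, y), (x+dx, y+dy))
--         if uf.is_connected(source, dest):
--             return soln
--
--     return -1
-- ===== SOURCE B (Python) =====
-- def solve(sx, sy, ex, ey, roads):
--     # Boundary case: (sx, sy) and (ex, ey) are equal or adjacent.
--     if (sx - ex) ** 2 + (sy - ey) ** 2 <= 1:
--         return 0
--     source, dest = (sx, sy), (ex, ey)
--     # flat partition: cell -> component label; merge = relabel one class
--     label = {source: 0, dest: 1}
--     nxt = 2
--     i = 0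
--     for x, y in roads:
--         cell = (x, y)
--         if cell not in label:
--             label[cell] = nxt
--             nxt += 1
--         i += 1
--         for nb in ((x, y + 1), (x, y - 1), (x + 1, y), (x - 1, y)):
--             if nb in label:
--                 old, new = label[nb], label[cell]
--                 if old != new:
--                     for c in label:
--                         if label[c] == old:
--                             label[c] = new
--         if label[source] == label[dest]:
--             return i
--     return -1
-- ===== Notes on version B (the rewrite author's own statement) =====
-- stated objective: alternative
-- what changed: Replaces the union-find forest (recursive find with path compression, union by size, parent/size dicts) by a flat cell-to-component-label dictionary in which two cells are connected iff they carry the same label and a merge relabels one whole class, keeping the same single scan over roads.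
import Mathlib
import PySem

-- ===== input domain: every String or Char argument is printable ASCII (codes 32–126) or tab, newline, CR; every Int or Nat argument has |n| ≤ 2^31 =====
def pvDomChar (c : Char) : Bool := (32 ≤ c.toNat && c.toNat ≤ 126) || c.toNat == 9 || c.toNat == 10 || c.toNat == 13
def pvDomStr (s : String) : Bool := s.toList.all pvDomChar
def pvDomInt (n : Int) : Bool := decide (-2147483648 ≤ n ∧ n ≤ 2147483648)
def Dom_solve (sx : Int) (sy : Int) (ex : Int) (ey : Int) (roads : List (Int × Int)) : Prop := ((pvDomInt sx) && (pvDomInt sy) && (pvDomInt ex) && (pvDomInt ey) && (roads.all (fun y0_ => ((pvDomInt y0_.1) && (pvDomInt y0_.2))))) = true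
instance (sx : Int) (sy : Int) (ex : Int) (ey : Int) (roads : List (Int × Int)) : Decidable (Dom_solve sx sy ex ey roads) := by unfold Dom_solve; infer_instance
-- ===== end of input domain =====

-- B replaces A's union-find forest (find with path compression, union by size) by a flat
-- cell→component-label dictionary merged by relabelling; same scan of roads, same return value
-- (objective: alternative — a different partition data structure, not a speed claim).

abbrev PvCell := Int × Int

-- ===== PORT A =====
-- Python's recursive `find` terminates because parent pointers form a forest; the port uses
-- explicit fuel (dict size + 1 at each call site, always sufficient — proved below) and
-- `none` for fuel exhaustion / KeyError, both unreachable from `solve`.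
def ufFind : Nat → PvCell → PySem.Dict PvCell PvCell → Option (PvCell × PySem.Dict PvCell PvCell)
  | 0, _, _ => none
  | f + 1, u, d =>
    match d.get? u with
    | none => none
    | some p =>
      if p = u then some (p, d)
      else
        match ufFind f p d with
        | none => none
        | some (r1, d1) =>
          match ufFind f r1 d1 with
          | none => none
          | some (r2, d2) => some (r2, d2.insert u r2)

def ufAdd (c : PvCell) (st : PySem.Dict PvCell PvCell × PySem.Dict PvCell Int) :
    PySem.Dict PvCell PvCell × PySem.Dict PvCell Int :=
  if (st.1.get? c).isSome then st else (st.1.insert c c, st.2.insert c 1)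

def ufUnion (u v : PvCell) (st : PySem.Dict PvCell PvCell × PySem.Dict PvCell Int) :
    Option (PySem.Dict PvCell PvCell × PySem.Dict PvCell Int) :=
  if (st.1.get? u).isNone || (st.1.get? v).isNone then some st else
  match ufFind (st.1.size + 1) u st.1 with
  | none => none
  | some (ru, d1) =>
    match ufFind (d1.size + 1) v d1 with
    | none => none
    | some (rv, d2) =>
      if ru = rv then some (d2, st.2)
      else
        match st.2.get? ru, st.2.get? rv with
        | some su, some sv =>
          if su < sv then some (d2.insert ru rv, st.2.insert rv (sv + su))
          else some (d2.insert rv ru, st.2.insert ru (su + sv))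
        | _, _ => none

def ufConn (u v : PvCell) (d : PySem.Dict PvCell PvCell) :
    Option (Bool × PySem.Dict PvCell PvCell) :=
  match ufFind (d.size + 1) u d with
  | none => none
  | some (ru, d1) =>
    match ufFind (d1.size + 1) v d1 with
    | none => none
    | some (rv, d2) => some (decide (ru = rv), d2)

def solveLoop (src dst : PvCell) :
    List PvCell → Int → PySem.Dict PvCell PvCell × PySem.Dict PvCell Int → Int
  | [], _, _ => -1
  | (x, y) :: rest, soln, st =>
    let st1 := ufAdd (x, y) st
    let soln1 := soln + 1
    match ufUnion (x, y) (x, y + 1) st1 with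
    | none => -2
    | some st2 =>
    match ufUnion (x, y) (x, y - 1) st2 with
    | none => -2
    | some st3 =>
    match ufUnion (x, y) (x + 1, y) st3 with
    | none => -2
    | some st4 =>
    match ufUnion (x, y) (x - 1, y) st4 with
    | none => -2
    | some st5 =>
    match ufConn src dst st5.1 with
    | none => -2
    | some (b, d') => if b then soln1 else solveLoop src dst rest soln1 (d', st5.2)

def solve (sx : Int) (sy : Int) (ex : Int) (ey : Int) (roads : List (Int × Int)) : Int :=
  let dist := (sx - ex) ^ 2 + (sy - ey) ^ 2
  if dist ≤ 1 then 0
  else solveLoop (sx, sy) (ex, ey) roads 0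
    (ufAdd (ex, ey) (ufAdd (sx, sy) (PySem.Dict.empty, PySem.Dict.empty)))

-- ===== PORT B =====
def altRelabel (oldl newl : Int) (lbl : PySem.Dict PvCell Int) : PySem.Dict PvCell Int :=
  lbl.keys.foldl (fun acc c => if acc.get? c = some oldl then acc.insert c newl else acc) lbl

def altMerge (cell nb : PvCell) (lbl : PySem.Dict PvCell Int) : PySem.Dict PvCell Int :=
  match lbl.get? nb with
  | none => lbl
  | some oldl =>
    match lbl.get? cell with
    | none => lbl   -- unreachable: in B's loop `cell` is always a key of `label`
    | some newl => if oldl ≠ newl then altRelabel oldl newl lbl else lbl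

def altLoop (src dst : PvCell) : List PvCell → Int → Int → PySem.Dict PvCell Int → Int
  | [], _, _, _ => -1
  | (x, y) :: rest, i, nxt, lbl =>
    let st1 : PySem.Dict PvCell Int × Int :=
      if (lbl.get? (x, y)).isSome then (lbl, nxt) else (lbl.insert (x, y) nxt, nxt + 1)
    let i1 := i + 1
    let l2 := altMerge (x, y) (x, y + 1) st1.1
    let l3 := altMerge (x, y) (x, y - 1) l2
    let l4 := altMerge (x, y) (x + 1, y) l3
    let l5 := altMerge (x, y) (x - 1, y) l4
    if l5.get? src = l5.get? dst then i1 else altLoop src dst rest i1 st1.2 l5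

def solve_alt (sx : Int) (sy : Int) (ex : Int) (ey : Int) (roads : List (Int × Int)) : Int :=
  if (sx - ex) ^ 2 + (sy - ey) ^ 2 ≤ 1 then 0
  else altLoop (sx, sy) (ex, ey) roads 0 2
    ((PySem.Dict.empty.insert (sx, sy) (0 : Int)).insert (ex, ey) (1 : Int))

-- ===== PRECONDITION & SPEC =====
def Spec_solve (sx : Int) (sy : Int) (ex : Int) (ey : Int) (roads : List (Int × Int)) (out : Int) : Prop := out = solve_alt sx sy ex ey roads
instance (sx : Int) (sy : Int) (ex : Int) (ey : Int) (roads : List (Int × Int)) (out : Int) : Decidable (Spec_solve sx sy ex ey roads out) := by unfold Spec_solve; infer_instance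

-- ===== CLAIM (what is proved, stated in full; the proofs are below) =====
def Claim_equal_solve : Prop := ∀ (sx : Int) (sy : Int) (ex : Int) (ey : Int) (roads : List (Int × Int)), Dom_solve sx sy ex ey roads → Spec_solve sx sy ex ey roads (solve sx sy ex ey roads)

-- ===== LEMMAS AND PROOFS =====

-- Parent-pointer iteration in A's id-dict, and the derived notions of root and
-- same-component; B's counterpart is label equality.
def pvIter (d : PySem.Dict PvCell PvCell) : Nat → PvCell → PvCell
  | 0, u => u
  | n + 1, u =>
    match d.get? u with
    | none => u
    | some p => if p = u then u else pvIter d n p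

def PvRoot (d : PySem.Dict PvCell PvCell) (u r : PvCell) : Prop :=
  d.get? r = some r ∧ ∃ n, pvIter d n u = r

def PvER (d : PySem.Dict PvCell PvCell) (a b : PvCell) : Prop :=
  ∃ r, PvRoot d a r ∧ PvRoot d b r

def PvJoin (P : PvCell → PvCell → Prop) (u v a b : PvCell) : Prop :=
  P a b ∨ (P a u ∧ P b v) ∨ (P a v ∧ P b u)

def LblEq (lbl : PySem.Dict PvCell Int) (a b : PvCell) : Prop :=
  ∃ l, lbl.get? a = some l ∧ lbl.get? b = some l

-- A's id-dict is a forest: every parent is present, and some rank strictly drops along edges.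
def PvInv (d : PySem.Dict PvCell PvCell) : Prop :=
  ∃ rk : PvCell → Nat, ∀ u p, d.get? u = some p →
    (d.get? p).isSome = true ∧ (p ≠ u → rk p < rk u)

theorem pvIter_fix (d : PySem.Dict PvCell PvCell) (v : PvCell) (h : d.get? v = some v) :
    ∀ n, pvIter d n v = v := by
  intro n; cases n with
  | zero => rfl
  | succ n => simp [pvIter, h]

theorem pvIter_none (d : PySem.Dict PvCell PvCell) (v : PvCell) (h : d.get? v = none) :
    ∀ n, pvIter d n v = v := by
  intro n; cases n with
  | zero => rfl
  | succ n => simp [pvIter, h]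

theorem pvIter_add (d : PySem.Dict PvCell PvCell) :
    ∀ (m n : Nat) (u : PvCell), pvIter d (m + n) u = pvIter d n (pvIter d m u) := by
  intro m
  induction m with
  | zero => intro n u; rw [Nat.zero_add]; rfl
  | succ m ih =>
    intro n u
    have hms : m + 1 + n = (m + n) + 1 := by omega
    rw [hms]
    cases hg : d.get? u with
    | none =>
      simp only [pvIter, hg]
      exact (pvIter_none d u hg n).symm
    | some p =>
      by_cases hp : p = u
      · subst hp
        simp only [pvIter, hg]
        exact (pvIter_fix d p hg n).symm
      · simp only [pvIter, hg, if_neg hp]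
        exact ih n p

theorem pvRoot_unique {d : PySem.Dict PvCell PvCell} {u r s : PvCell}
    (hr : PvRoot d u r) (hs : PvRoot d u s) : r = s := by
  obtain ⟨hrr, n, hn⟩ := hr
  obtain ⟨hss, m, hm⟩ := hs
  rcases le_total n m with h | h
  · have : pvIter d m u = pvIter d (m - n) (pvIter d n u) := by
      rw [← pvIter_add]; congr 1; omega
    rw [hn, pvIter_fix d r hrr] at this
    rw [← hm, this]
  · have : pvIter d n u = pvIter d (n - m) (pvIter d m u) := by
      rw [← pvIter_add]; congr 1; omega
    rw [hm, pvIter_fix d s hss] at this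
    rw [← hn, this]

theorem pvRoot_step {d : PySem.Dict PvCell PvCell} {u p : PvCell}
    (hu : d.get? u = some p) (hne : p ≠ u) (r : PvCell) :
    PvRoot d u r ↔ PvRoot d p r := by
  constructor
  · rintro ⟨hrr, n, hn⟩
    cases n with
    | zero =>
      exfalso; apply hne
      simp only [pvIter] at hn
      subst hn; rw [hu] at hrr; exact (Option.some_inj.mp hrr)
    | succ m =>
      refine ⟨hrr, m, ?_⟩
      simpa only [pvIter, hu, if_neg hne] using hn
  · rintro ⟨hrr, n, hn⟩
    exact ⟨hrr, n + 1, by simpa only [pvIter, hu, if_neg hne] using hn⟩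

theorem pvRoot_root {d : PySem.Dict PvCell PvCell} {r : PvCell} (h : d.get? r = some r) :
    ∀ s, PvRoot d r s ↔ s = r := by
  intro s
  constructor
  · intro hs
    exact (pvRoot_unique (⟨h, 0, rfl⟩ : PvRoot d r r) hs).symm
  · rintro rfl
    exact ⟨h, 0, rfl⟩

theorem pvRoot_nonkey {d : PySem.Dict PvCell PvCell} {u : PvCell} (h : d.get? u = none) :
    ∀ s, ¬ PvRoot d u s := by
  rintro s ⟨hss, n, hn⟩
  rw [pvIter_none d u h n] at hn
  subst hn
  rw [h] at hss
  exact absurd hss (by simp)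

-- every key reaches a root, within fewer steps than the dict has entries
theorem pvReach {d : PySem.Dict PvCell PvCell} (hinv : PvInv d) {u : PvCell}
    (hu : (d.get? u).isSome = true) : ∃ n r, pvIter d n u = r ∧ d.get? r = some r ∧ n + 1 ≤ d.size := by
  obtain ⟨rk, hrk⟩ := hinv
  have reach : ∀ N v, rk v < N → (d.get? v).isSome = true →
      ∃ n, d.get? (pvIter d n v) = some (pvIter d n v) := by
    intro N
    induction N with
    | zero => intro v hv; omega
    | succ N ih =>
      intro v hv hvs
      obtain ⟨p, hp⟩ := Option.isSome_iff_exists.mp hvs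
      by_cases hpv : p = v
      · exact ⟨0, by simpa only [pvIter] using (hpv ▸ hp : d.get? v = some v)⟩
      · obtain ⟨hps, hlt⟩ := hrk v p hp
        obtain ⟨n, hn⟩ := ih p (by have := hlt hpv; omega) hps
        exact ⟨n + 1, by simpa only [pvIter, hp, if_neg hpv] using hn⟩
  have hex : ∃ n, d.get? (pvIter d n u) = some (pvIter d n u) := reach (rk u + 1) u (by omega) hu
  set n := Nat.find hex with hn_def
  have hroot := Nat.find_spec hex
  have hmin : ∀ m, m < n → ¬ d.get? (pvIter d m u) = some (pvIter d m u) :=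
    fun m hm => Nat.find_min hex hm
  have hshift : ∀ k, k ≤ n → pvIter d (n - k) (pvIter d k u) = pvIter d n u := by
    intro k hk
    rw [← pvIter_add]; congr 1; omega
  have hinj : ∀ k l, k ≤ n → l ≤ n → pvIter d k u = pvIter d l u → k = l := by
    have core : ∀ k l, k < l → l ≤ n → pvIter d k u = pvIter d l u → False := by
      intro k l hkl hl heq
      have h1 : pvIter d (k + (n - l)) u = pvIter d n u := by
        rw [pvIter_add, heq, hshift l hl]
      have h2 : d.get? (pvIter d (k + (n - l)) u) = some (pvIter d (k + (n - l)) u) := by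
        rw [h1]; exact hroot
      exact hmin (k + (n - l)) (by omega) h2
    intro k l hk hl heq
    rcases lt_trichotomy k l with h | h | h
    · exact absurd heq (fun he => core k l h hl he)
    · exact h
    · exact absurd heq.symm (fun he => core l k h hk he)
  have hkeys : ∀ k, k ≤ n → (d.get? (pvIter d k u)).isSome = true := by
    intro k
    induction k with
    | zero => intro _; simpa only [pvIter] using hu
    | succ k ih =>
      intro hk
      have hsome := ih (by omega)
      obtain ⟨p, hp⟩ := Option.isSome_iff_exists.mp hsome
      have hpne : p ≠ pvIter d k u := by
        intro h; exact hmin k (by omega) (h ▸ hp)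
      have hstep : pvIter d (k + 1) u = p := by
        have h1 : pvIter d (k + 1) u = pvIter d 1 (pvIter d k u) := by rw [← pvIter_add]
        rw [h1]; simp only [pvIter, hp, if_neg hpne]
      rw [hstep]
      exact (hrk _ p hp).1
  have hcard : n + 1 ≤ d.size := by
    have hsub : ∀ k ∈ Finset.range (n + 1), pvIter d k u ∈ d.keys.toFinset := by
      intro k hk
      simp only [Finset.mem_range] at hk
      have hk' := hkeys k (by omega)
      rw [List.mem_toFinset]
      by_contra hmem
      rw [← PySem.Dict.get?_eq_none_iff_not_mem_keys] at hmem
      rw [hmem] at hk'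
      simp at hk'
    have hinj' : Set.InjOn (fun k => pvIter d k u) (Finset.range (n + 1)) := by
      intro k hk l hl heq
      simp only [Finset.coe_range, Set.mem_Iio] at hk hl
      exact hinj k l (by omega) (by omega) heq
    calc n + 1 = (Finset.range (n + 1)).card := (Finset.card_range _).symm
      _ ≤ d.keys.toFinset.card := Finset.card_le_card_of_injOn _ hsub hinj'
      _ ≤ d.keys.length := List.toFinset_card_le _
      _ ≤ d.size := by
          simp only [PySem.Dict.keys, PySem.Dict.size, List.length_map]
          exact le_refl _
  exact ⟨n, pvIter d n u, rfl, hroot, hcard⟩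

theorem ufFind_root (d : PySem.Dict PvCell PvCell) {r : PvCell} (h : d.get? r = some r)
    {f : Nat} (hf : 1 ≤ f) : ufFind f r d = some (r, d) := by
  cases f with
  | zero => omega
  | succ f => simp [ufFind, h]

theorem pvRank_lt {d : PySem.Dict PvCell PvCell} {rk : PvCell → Nat}
    (hrk : ∀ u p, d.get? u = some p → (d.get? p).isSome = true ∧ (p ≠ u → rk p < rk u))
    {r : PvCell} :
    ∀ n u, pvIter d n u = r → r ≠ u → rk r < rk u := by
  intro n
  induction n with
  | zero =>
    intro u hn hne
    exact absurd hn.symm hne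
  | succ m ih =>
    intro u hn hne
    cases hg : d.get? u with
    | none =>
      rw [pvIter_none d u hg] at hn
      exact absurd hn.symm hne
    | some p =>
      by_cases hpu : p = u
      · subst hpu
        rw [pvIter_fix d p hg] at hn
        exact absurd hn.symm hne
      · have hn' : pvIter d m p = r := by simpa only [pvIter, hg, if_neg hpu] using hn
        have hlt : rk p < rk u := (hrk u p hg).2 hpu
        by_cases hrp : r = p
        · subst hrp; exact hlt
        · exact lt_trans (ih p hn' hrp) hlt

theorem pvCompress {d : PySem.Dict PvCell PvCell} (hinv : PvInv d) {u r : PvCell}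
    (hu : (d.get? u).isSome = true) (hr : PvRoot d u r) :
    PvInv (d.insert u r) ∧ (d.insert u r).size = d.size ∧
    (∀ w, ((d.insert u r).get? w).isSome = (d.get? w).isSome) ∧
    (∀ v s, PvRoot (d.insert u r) v s ↔ PvRoot d v s) := by
  obtain ⟨rk, hrk⟩ := hinv
  obtain ⟨hrr, nchain, hchain⟩ := hr
  have hget : ∀ w, (d.insert u r).get? w = if w = u then some r else d.get? w := by
    intro w; exact PySem.Dict.get?_insert d u w r
  have hpres : ∀ w, ((d.insert u r).get? w).isSome = (d.get? w).isSome := by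
    intro w; rw [hget]
    by_cases hw : w = u
    · subst hw; simp [hu]
    · simp [hw]
  have hrku : r ≠ u → rk r < rk u := fun hne => pvRank_lt hrk nchain u hchain hne
  refine ⟨⟨rk, ?_⟩, ?_, hpres, ?_⟩
  · intro w p hw
    rw [hget] at hw
    by_cases hwu : w = u
    · rw [if_pos hwu] at hw
      have hpr : p = r := by simpa using hw.symm
      refine ⟨?_, ?_⟩
      · rw [hpres, hpr]
        by_cases hru2 : r = u
        · rw [hru2]; exact hu
        · rw [hrr]; rfl
      · rw [hpr, hwu]; exact hrku
    · rw [if_neg hwu] at hw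
      obtain ⟨h1, h2⟩ := hrk w p hw
      exact ⟨by rw [hpres]; exact h1, h2⟩
  · rw [PySem.Dict.size_insert]
    rw [PySem.Dict.contains_eq_isSome_get?, hu]
    simp
  · -- root preservation, by strong induction on rank
    have main : ∀ N v s, rk v < N → (PvRoot (d.insert u r) v s ↔ PvRoot d v s) := by
      intro N
      induction N with
      | zero => intro v s hv; omega
      | succ N ih =>
        intro v s hv
        by_cases hvu : v = u
        · subst hvu
          have hRu : ∀ t, PvRoot d v t ↔ t = r := by
            intro t
            constructor
            · intro h; exact pvRoot_unique h ⟨hrr, nchain, hchain⟩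
            · rintro rfl; exact ⟨hrr, nchain, hchain⟩
          by_cases hru : r = v
          · -- inserting v ↦ v : v stays a root
            have hgv : (d.insert v r).get? v = some v := by rw [hget, if_pos rfl, hru]
            rw [pvRoot_root hgv s, hRu s, hru]
          · have hgv : (d.insert v r).get? v = some r := by rw [hget, if_pos rfl]
            rw [pvRoot_step hgv hru s]
            have hrkr : rk r < N := by have := hrku hru; omega
            rw [ih r s hrkr]
            have hgr : d.get? r = some r := hrr
            rw [pvRoot_root hgr s, hRu s]
        · have hgv : (d.insert u r).get? v = d.get? v := by rw [hget, if_neg hvu]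
          cases hdv : d.get? v with
          | none =>
            have hgv' : (d.insert u r).get? v = none := by rw [hgv, hdv]
            constructor
            · intro h; exact absurd h (pvRoot_nonkey hgv' s)
            · intro h; exact absurd h (pvRoot_nonkey hdv s)
          | some p =>
            by_cases hpv : p = v
            · have hdv' : d.get? v = some v := by rw [hpv] at hdv; exact hdv
              have hgv' : (d.insert u r).get? v = some v := by rw [hgv, hdv']
              rw [pvRoot_root hgv' s, pvRoot_root hdv' s]
            · have hgv' : (d.insert u r).get? v = some p := by rw [hgv, hdv]
              rw [pvRoot_step hgv' hpv s, pvRoot_step hdv hpv s]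
              exact ih p s (by have := (hrk v p hdv).2 hpv; omega)
    intro v s
    exact main (rk v + 1) v s (by omega)

theorem pvFind_ok : ∀ (n f : Nat) (d : PySem.Dict PvCell PvCell) (u r : PvCell),
    PvInv d → pvIter d n u = r → d.get? r = some r → n + 1 ≤ f → (d.get? u).isSome = true →
    ∃ d', ufFind f u d = some (r, d') ∧ PvInv d' ∧ d'.size = d.size ∧
      (∀ w, (d'.get? w).isSome = (d.get? w).isSome) ∧
      (∀ v s, PvRoot d' v s ↔ PvRoot d v s) := by
  intro n
  induction n with
  | zero =>
    intro f d u r hinv hiter hroot hf hu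
    obtain ⟨f', rfl⟩ : ∃ f', f = f' + 1 := ⟨f - 1, by omega⟩
    have hru : r = u := by simpa only [pvIter] using hiter.symm
    subst hru
    refine ⟨d, ?_, hinv, rfl, fun _ => rfl, fun _ _ => Iff.rfl⟩
    simp [ufFind, hroot]
  | succ m ih =>
    intro f d u r hinv hiter hroot hf hu
    obtain ⟨f', rfl⟩ : ∃ f', f = f' + 1 := ⟨f - 1, by omega⟩
    obtain ⟨p, hp⟩ := Option.isSome_iff_exists.mp hu
    by_cases hpu : p = u
    · -- u is its own root
      have hup : d.get? u = some u := by rw [hp, hpu]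
      have hru : r = u := by rw [← hiter, pvIter_fix d u hup]
      subst hru
      refine ⟨d, ?_, hinv, rfl, fun _ => rfl, fun _ _ => Iff.rfl⟩
      simp [ufFind, hup]
    · have hiter' : pvIter d m p = r := by simpa only [pvIter, hp, if_neg hpu] using hiter
      have hps : (d.get? p).isSome = true := by
        obtain ⟨rk, hrk⟩ := hinv
        exact (hrk u p hp).1
      obtain ⟨d1, hfind1, hinv1, hsz1, hpres1, hrootpres1⟩ :=
        ih f' d p r hinv hiter' hroot (by omega) hps
      have hr1 : d1.get? r = some r :=
        ((hrootpres1 r r).mpr ⟨hroot, 0, rfl⟩).1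
      have hfind2 : ufFind f' r d1 = some (r, d1) := ufFind_root d1 hr1 (by omega)
      have hu1 : (d1.get? u).isSome = true := by rw [hpres1]; exact hu
      have hru1 : PvRoot d1 u r := (hrootpres1 u r).mpr ⟨hroot, m + 1, hiter⟩
      obtain ⟨hinv2, hsz2, hpres2, hrootpres2⟩ := pvCompress hinv1 hu1 hru1
      refine ⟨d1.insert u r, ?_, hinv2, by rw [hsz2, hsz1],
        fun w => by rw [hpres2, hpres1], fun v s => by rw [hrootpres2, hrootpres1]⟩
      simp only [ufFind, hp, if_neg hpu, hfind1, hfind2]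

-- find at the standard call-site fuel (size + 1) always succeeds on a key
theorem pvFind_ok' {d : PySem.Dict PvCell PvCell} (hinv : PvInv d) {u : PvCell}
    (hu : (d.get? u).isSome = true) :
    ∃ r d', ufFind (d.size + 1) u d = some (r, d') ∧ PvRoot d u r ∧ PvInv d' ∧
      d'.size = d.size ∧ (∀ w, (d'.get? w).isSome = (d.get? w).isSome) ∧
      (∀ v s, PvRoot d' v s ↔ PvRoot d v s) := by
  obtain ⟨n, r, hiter, hroot, hle⟩ := pvReach hinv hu
  obtain ⟨d', ha, hb, hc, he, hf⟩ :=
    pvFind_ok n (d.size + 1) d u r hinv hiter hroot (by omega) hu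
  exact ⟨r, d', ha, ⟨hroot, n, hiter⟩, hb, hc, he, hf⟩

-- hanging root r2 under root r1 joins the two classes and nothing else
theorem pvHang {d : PySem.Dict PvCell PvCell} (hinv : PvInv d) {r1 r2 : PvCell}
    (h1 : d.get? r1 = some r1) (h2 : d.get? r2 = some r2) (hne : r1 ≠ r2) :
    PvInv (d.insert r2 r1) ∧
    (∀ w, ((d.insert r2 r1).get? w).isSome = (d.get? w).isSome) ∧
    (∀ v s, PvRoot (d.insert r2 r1) v s ↔
      ((PvRoot d v s ∧ s ≠ r2) ∨ (PvRoot d v r2 ∧ s = r1))) := by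
  classical
  obtain ⟨rk, hrk⟩ := hinv
  have hget : ∀ w, (d.insert r2 r1).get? w = if w = r2 then some r1 else d.get? w :=
    fun w => PySem.Dict.get?_insert d r2 w r1
  have hpres : ∀ w, ((d.insert r2 r1).get? w).isSome = (d.get? w).isSome := by
    intro w; rw [hget]; by_cases hw : w = r2
    · rw [if_pos hw, hw, h2]; rfl
    · rw [if_neg hw]
  set rk' : PvCell → Nat := fun x => if PvRoot d x r2 then rk x + rk r1 + 1 else rk x
    with hrk'def
  have hrk'r1 : rk' r1 = rk r1 := by
    simp only [hrk'def]; rw [if_neg]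
    intro h; exact hne ((pvRoot_root h1 r2).mp h).symm
  have hrk'r2 : rk' r2 = rk r2 + rk r1 + 1 := by
    simp only [hrk'def]; rw [if_pos ⟨h2, 0, rfl⟩]
  have hedge : ∀ w p, d.get? w = some p → p ≠ w → rk' p < rk' w := by
    intro w p hw hpw
    have hlt := (hrk w p hw).2 hpw
    have hiff := pvRoot_step hw hpw r2
    simp only [hrk'def]
    by_cases hcase : PvRoot d p r2
    · rw [if_pos hcase, if_pos (hiff.mpr hcase)]; omega
    · rw [if_neg hcase, if_neg (fun h => hcase (hiff.mp h))]; exact hlt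
  have hinv' : PvInv (d.insert r2 r1) := by
    refine ⟨rk', ?_⟩
    intro w p hw
    rw [hget] at hw
    by_cases hw2 : w = r2
    · rw [if_pos hw2] at hw
      have hp1 : p = r1 := by simpa using hw.symm
      refine ⟨by rw [hpres, hp1, h1]; rfl, ?_⟩
      intro _
      rw [hp1, hw2, hrk'r1, hrk'r2]; omega
    · rw [if_neg hw2] at hw
      obtain ⟨hc, _⟩ := hrk w p hw
      exact ⟨by rw [hpres]; exact hc, hedge w p hw⟩
  have main : ∀ N v s, rk' v < N → (PvRoot (d.insert r2 r1) v s ↔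
      ((PvRoot d v s ∧ s ≠ r2) ∨ (PvRoot d v r2 ∧ s = r1))) := by
    intro N
    induction N with
    | zero => intro v s hv; omega
    | succ N ih =>
      intro v s hv
      by_cases hv2 : v = r2
      · have hgv : (d.insert r2 r1).get? v = some r1 := by rw [hget, if_pos hv2]
        have hner1 : r1 ≠ v := by rw [hv2]; exact hne
        rw [pvRoot_step hgv hner1 s]
        have hr1N : rk' r1 < N := by
          rw [hv2] at hv; rw [hrk'r2] at hv; rw [hrk'r1]; omega
        rw [ih r1 s hr1N]
        constructor
        · rintro (⟨ha, _⟩ | ⟨ha, _⟩)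
          · have hs : s = r1 := (pvRoot_root h1 s).mp ha
            right; exact ⟨by rw [hv2]; exact ⟨h2, 0, rfl⟩, hs⟩
          · have : r2 = r1 := (pvRoot_root h1 r2).mp ha
            exact absurd this.symm hne
        · rintro (⟨ha, hb⟩ | ⟨_, hb⟩)
          · rw [hv2] at ha
            exact absurd ((pvRoot_root h2 s).mp ha) hb
          · left
            refine ⟨by rw [hb]; exact ⟨h1, 0, rfl⟩, by rw [hb]; exact hne⟩
      · have hgv : (d.insert r2 r1).get? v = d.get? v := by rw [hget, if_neg hv2]
        cases hdv : d.get? v with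
        | none =>
          have h'none : (d.insert r2 r1).get? v = none := by rw [hgv, hdv]
          constructor
          · intro h; exact absurd h (pvRoot_nonkey h'none s)
          · rintro (⟨h, _⟩ | ⟨h, _⟩) <;> exact absurd h (pvRoot_nonkey hdv _)
        | some p =>
          by_cases hpv : p = v
          · have hdv' : d.get? v = some v := by rw [hpv] at hdv; exact hdv
            have h'v : (d.insert r2 r1).get? v = some v := by rw [hgv, hdv']
            rw [pvRoot_root h'v s]
            constructor
            · rintro rfl
              left; exact ⟨⟨hdv', 0, rfl⟩, hv2⟩
            · rintro (⟨ha, _⟩ | ⟨ha, _⟩)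
              · exact (pvRoot_root hdv' s).mp ha
              · exact absurd ((pvRoot_root hdv' r2).mp ha).symm hv2
          · have h'v : (d.insert r2 r1).get? v = some p := by rw [hgv, hdv]
            rw [pvRoot_step h'v hpv s, pvRoot_step hdv hpv s, pvRoot_step hdv hpv r2]
            exact ih p s (by have := hedge v p hdv hpv; omega)
  exact ⟨hinv', hpres, fun v s => main (rk' v + 1) v s (by omega)⟩

theorem pvHang_ER {d : PySem.Dict PvCell PvCell} (hinv : PvInv d) {r1 r2 : PvCell}
    (h1 : d.get? r1 = some r1) (h2 : d.get? r2 = some r2) (hne : r1 ≠ r2) :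
    ∀ a b, PvER (d.insert r2 r1) a b ↔ PvJoin (PvER d) r1 r2 a b := by
  obtain ⟨_, _, hform⟩ := pvHang hinv h1 h2 hne
  have hR1 : PvRoot d r1 r1 := ⟨h1, 0, rfl⟩
  have hR2 : PvRoot d r2 r2 := ⟨h2, 0, rfl⟩
  intro a b
  constructor
  · rintro ⟨s, hsa, hsb⟩
    rw [hform] at hsa hsb
    rcases hsa with ⟨ha, hs⟩ | ⟨ha, hs⟩ <;> rcases hsb with ⟨hb, hs'⟩ | ⟨hb, hs'⟩
    · exact Or.inl ⟨s, ha, hb⟩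
    · exact Or.inr (Or.inl ⟨⟨r1, hs' ▸ ha, hR1⟩, ⟨r2, hb, hR2⟩⟩)
    · exact Or.inr (Or.inr ⟨⟨r2, ha, hR2⟩, ⟨r1, hs ▸ hb, hR1⟩⟩)
    · exact Or.inl ⟨r2, ha, hb⟩
  · have mk : ∀ x sx, PvRoot d x sx →
        PvRoot (d.insert r2 r1) x (if sx = r2 then r1 else sx) := by
      intro x sx hx
      rw [hform]
      by_cases h : sx = r2
      · rw [if_pos h]; right; exact ⟨h ▸ hx, rfl⟩
      · rw [if_neg h]; left; exact ⟨hx, h⟩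
    rintro (⟨s, ha, hb⟩ | ⟨⟨sa, ha1, ha2⟩, ⟨sb, hb1, hb2⟩⟩ | ⟨⟨sa, ha1, ha2⟩, ⟨sb, hb1, hb2⟩⟩)
    · exact ⟨_, mk a s ha, mk b s hb⟩
    · have hsa : sa = r1 := (pvRoot_root h1 sa).mp ha2
      have hsb : sb = r2 := (pvRoot_root h2 sb).mp hb2
      refine ⟨r1, ?_, ?_⟩
      · have := mk a r1 (hsa ▸ ha1)
        rwa [if_neg hne] at this
      · have := mk b r2 (hsb ▸ hb1)
        rwa [if_pos rfl] at this
    · have hsa : sa = r2 := (pvRoot_root h2 sa).mp ha2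
      have hsb : sb = r1 := (pvRoot_root h1 sb).mp hb2
      refine ⟨r1, ?_, ?_⟩
      · have := mk a r2 (hsa ▸ ha1)
        rwa [if_pos rfl] at this
      · have := mk b r1 (hsb ▸ hb1)
        rwa [if_neg hne] at this

-- adding a fresh self-parented cell creates a new singleton class
theorem pvAddRoot {d : PySem.Dict PvCell PvCell} (hinv : PvInv d) {c : PvCell}
    (hc : d.get? c = none) :
    PvInv (d.insert c c) ∧
    (∀ v s, PvRoot (d.insert c c) v s ↔ (PvRoot d v s ∨ (v = c ∧ s = c))) := by
  obtain ⟨rk, hrk⟩ := hinv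
  have hget : ∀ w, (d.insert c c).get? w = if w = c then some c else d.get? w :=
    fun w => PySem.Dict.get?_insert d c w c
  have hinv' : PvInv (d.insert c c) := by
    refine ⟨rk, ?_⟩
    intro w p hw
    rw [hget] at hw
    by_cases hwc : w = c
    · rw [if_pos hwc] at hw
      have hpc : p = c := by simpa using hw.symm
      refine ⟨by simp [hget, hpc], ?_⟩
      intro hne; exact absurd (hpc.trans hwc.symm) hne
    · rw [if_neg hwc] at hw
      obtain ⟨hcl, hlt⟩ := hrk w p hw
      refine ⟨?_, hlt⟩
      rw [hget]
      by_cases hpc : p = c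
      · rw [if_pos hpc]; rfl
      · rw [if_neg hpc]; exact hcl
  have main : ∀ N v s, rk v < N →
      (PvRoot (d.insert c c) v s ↔ (PvRoot d v s ∨ (v = c ∧ s = c))) := by
    intro N
    induction N with
    | zero => intro v s hv; omega
    | succ N ih =>
      intro v s hv
      by_cases hvc : v = c
      · have hgv : (d.insert c c).get? v = some v := by rw [hget, if_pos hvc, hvc]
        rw [pvRoot_root hgv s]
        constructor
        · rintro rfl; right; exact ⟨hvc, hvc⟩
        · rintro (h | ⟨_, hs⟩)
          · exact absurd h (pvRoot_nonkey (hvc ▸ hc) s)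
          · rw [hs, hvc]
      · have hgv : (d.insert c c).get? v = d.get? v := by rw [hget, if_neg hvc]
        cases hdv : d.get? v with
        | none =>
          have h'none : (d.insert c c).get? v = none := by rw [hgv, hdv]
          constructor
          · intro h; exact absurd h (pvRoot_nonkey h'none s)
          · rintro (h | ⟨hv', _⟩)
            · exact absurd h (pvRoot_nonkey hdv s)
            · exact absurd hv' hvc
        | some p =>
          by_cases hpv : p = v
          · have hdv' : d.get? v = some v := by rw [hpv] at hdv; exact hdv
            have h'v : (d.insert c c).get? v = some v := by rw [hgv, hdv']
            rw [pvRoot_root h'v s]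
            constructor
            · rintro rfl; exact Or.inl ⟨hdv', 0, rfl⟩
            · rintro (h | ⟨hv', _⟩)
              · exact (pvRoot_root hdv' s).mp h
              · exact absurd hv' hvc
          · have hpkey : (d.get? p).isSome = true := (hrk v p hdv).1
            have hpc : p ≠ c := by
              intro h; rw [h, hc] at hpkey; simp at hpkey
            have h'v : (d.insert c c).get? v = some p := by rw [hgv, hdv]
            rw [pvRoot_step h'v hpv s, pvRoot_step hdv hpv s]
            rw [ih p s (by have := (hrk v p hdv).2 hpv; omega)]
            constructor
            · rintro (h | ⟨hp', _⟩)
              · exact Or.inl h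
              · exact absurd hp' hpc
            · rintro (h | ⟨hv', _⟩)
              · exact Or.inl h
              · exact absurd hv' hvc
  exact ⟨hinv', fun v s => main (rk v + 1) v s (by omega)⟩

theorem pvAddRoot_ER {d : PySem.Dict PvCell PvCell} (hinv : PvInv d) {c : PvCell}
    (hc : d.get? c = none) :
    ∀ a b, PvER (d.insert c c) a b ↔ (PvER d a b ∨ (a = c ∧ b = c)) := by
  obtain ⟨_, hform⟩ := pvAddRoot hinv hc
  intro a b
  constructor
  · rintro ⟨s, hsa, hsb⟩
    rw [hform] at hsa hsb
    rcases hsa with ha | ⟨ha1, ha2⟩ <;> rcases hsb with hb | ⟨hb1, hb2⟩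
    · exact Or.inl ⟨s, ha, hb⟩
    · exfalso
      obtain ⟨hroot, _⟩ := ha
      rw [hb2, hc] at hroot; exact absurd hroot (by simp)
    · exfalso
      obtain ⟨hroot, _⟩ := hb
      rw [ha2, hc] at hroot; exact absurd hroot (by simp)
    · exact Or.inr ⟨ha1, hb1⟩
  · rintro (⟨s, ha, hb⟩ | ⟨hac, hbc⟩)
    · exact ⟨s, (hform a s).mpr (Or.inl ha), (hform b s).mpr (Or.inl hb)⟩
    · refine ⟨c, ?_, ?_⟩
      · rw [hac]; exact (hform c c).mpr (Or.inr ⟨rfl, rfl⟩)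
      · rw [hbc]; exact (hform c c).mpr (Or.inr ⟨rfl, rfl⟩)


theorem pvER_symm {d : PySem.Dict PvCell PvCell} :
    ∀ a b, PvER d a b → PvER d b a := fun _ _ ⟨r, ha, hb⟩ => ⟨r, hb, ha⟩

theorem pvER_trans {d : PySem.Dict PvCell PvCell} :
    ∀ a b c, PvER d a b → PvER d b c → PvER d a c := by
  rintro a b c ⟨r, ha, hb⟩ ⟨r', hb', hc⟩
  exact ⟨r, ha, (pvRoot_unique hb hb') ▸ hc⟩

theorem lblEq_symm {lbl : PySem.Dict PvCell Int} :
    ∀ a b, LblEq lbl a b → LblEq lbl b a := fun _ _ ⟨l, ha, hb⟩ => ⟨l, hb, ha⟩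

theorem lblEq_trans {lbl : PySem.Dict PvCell Int} :
    ∀ a b c, LblEq lbl a b → LblEq lbl b c → LblEq lbl a c := by
  rintro a b c ⟨l, ha, hb⟩ ⟨l', hb', hc⟩
  have : l = l' := by rw [hb] at hb'; exact Option.some_inj.mp hb'
  exact ⟨l, ha, this ▸ hc⟩

theorem pvJoin_collapse {P : PvCell → PvCell → Prop}
    (hsymm : ∀ a b, P a b → P b a) (htrans : ∀ a b c, P a b → P b c → P a c)
    {u v : PvCell} (huv : P u v) : ∀ a b, PvJoin P u v a b ↔ P a b := by
  intro a b
  constructor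
  · rintro (h | ⟨h1, h2⟩ | ⟨h1, h2⟩)
    · exact h
    · exact htrans _ _ _ (htrans _ _ _ h1 huv) (hsymm _ _ h2)
    · exact htrans _ _ _ (htrans _ _ _ h1 (hsymm _ _ huv)) (hsymm _ _ h2)
  · exact fun h => Or.inl h

theorem pvJoin_congr_pts {P : PvCell → PvCell → Prop}
    (hsymm : ∀ a b, P a b → P b a) (htrans : ∀ a b c, P a b → P b c → P a c)
    {u u' v v' : PvCell} (hu : P u u') (hv : P v v') :
    ∀ a b, PvJoin P u v a b ↔ PvJoin P u' v' a b := by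
  intro a b
  constructor
  · rintro (h | ⟨h1, h2⟩ | ⟨h1, h2⟩)
    · exact Or.inl h
    · exact Or.inr (Or.inl ⟨htrans _ _ _ h1 hu, htrans _ _ _ h2 hv⟩)
    · exact Or.inr (Or.inr ⟨htrans _ _ _ h1 hv, htrans _ _ _ h2 hu⟩)
  · rintro (h | ⟨h1, h2⟩ | ⟨h1, h2⟩)
    · exact Or.inl h
    · exact Or.inr (Or.inl ⟨htrans _ _ _ h1 (hsymm _ _ hu), htrans _ _ _ h2 (hsymm _ _ hv)⟩)
    · exact Or.inr (Or.inr ⟨htrans _ _ _ h1 (hsymm _ _ hv), htrans _ _ _ h2 (hsymm _ _ hu)⟩)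

theorem pvJoin_swap {P : PvCell → PvCell → Prop} {u v a b : PvCell} :
    PvJoin P u v a b ↔ PvJoin P v u a b := by
  unfold PvJoin; tauto

theorem pvJoin_iff {P Q : PvCell → PvCell → Prop} (h : ∀ a b, P a b ↔ Q a b)
    (u v a b : PvCell) : PvJoin P u v a b ↔ PvJoin Q u v a b := by
  simp only [PvJoin, h]

def SzDom (d : PySem.Dict PvCell PvCell) (sz : PySem.Dict PvCell Int) : Prop :=
  ∀ c, (d.get? c).isSome = true → (sz.get? c).isSome = true

theorem pvUnion_skip {u v : PvCell} {d : PySem.Dict PvCell PvCell}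
    {sz : PySem.Dict PvCell Int} (hv : d.get? v = none) :
    ufUnion u v (d, sz) = some (d, sz) := by
  simp [ufUnion, hv]

theorem pvUnion_ok {d : PySem.Dict PvCell PvCell} {sz : PySem.Dict PvCell Int}
    (hinv : PvInv d) (hsz : SzDom d sz) {u v : PvCell}
    (hu : (d.get? u).isSome = true) (hv : (d.get? v).isSome = true) :
    ∃ d' sz', ufUnion u v (d, sz) = some (d', sz') ∧ PvInv d' ∧
      (∀ w, (d'.get? w).isSome = (d.get? w).isSome) ∧ SzDom d' sz' ∧
      (∀ a b, PvER d' a b ↔ PvJoin (PvER d) u v a b) := by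
  obtain ⟨ru, d1, hf1, hru, hinv1, hsz1, hpres1, hrp1⟩ := pvFind_ok' hinv hu
  have hv1 : (d1.get? v).isSome = true := by rw [hpres1]; exact hv
  obtain ⟨rv, d2, hf2, hrv1, hinv2, hsz2, hpres2, hrp2⟩ := pvFind_ok' hinv1 hv1
  have hrv : PvRoot d v rv := (hrp1 v rv).mp hrv1
  have hru2 : d2.get? ru = some ru :=
    ((hrp2 ru ru).mpr ((hrp1 ru ru).mpr ⟨hru.1, 0, rfl⟩)).1
  have hrv2 : d2.get? rv = some rv :=
    ((hrp2 rv rv).mpr ((hrp1 rv rv).mpr ⟨hrv.1, 0, rfl⟩)).1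
  have hERpres2 : ∀ a b, PvER d2 a b ↔ PvER d a b := by
    intro a b
    exact exists_congr fun r =>
      and_congr ((hrp2 a r).trans (hrp1 a r)) ((hrp2 b r).trans (hrp1 b r))
  have hcond : ((d.get? u).isNone || (d.get? v).isNone) = false := by
    cases hgu : d.get? u with
    | none => rw [hgu] at hu; simp at hu
    | some _ =>
      cases hgv : d.get? v with
      | none => rw [hgv] at hv; simp at hv
      | some _ => rfl
  have hERu : PvER d u ru := ⟨ru, hru, ⟨hru.1, 0, rfl⟩⟩
  have hERv : PvER d v rv := ⟨rv, hrv, ⟨hrv.1, 0, rfl⟩⟩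
  by_cases hrr : ru = rv
  · refine ⟨d2, sz, ?_, hinv2, fun w => (hpres2 w).trans (hpres1 w), ?_, ?_⟩
    · simp only [ufUnion, hcond, Bool.false_eq_true, if_false, hf1, hf2, if_pos hrr]
    · intro c hc
      rw [hpres2 c, hpres1 c] at hc
      exact hsz c hc
    · intro a b
      rw [hERpres2]
      have huv : PvER d u v := pvER_trans u ru v (pvER_trans u ru ru hERu ⟨ru, ⟨hru.1, 0, rfl⟩, ⟨hru.1, 0, rfl⟩⟩) (hrr ▸ (pvER_symm v rv hERv))
      exact (pvJoin_collapse pvER_symm pvER_trans huv a b).symm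
  · have hszu : (sz.get? ru).isSome = true := hsz ru (by rw [hru.1]; rfl)
    have hszv : (sz.get? rv).isSome = true := hsz rv (by rw [hrv.1]; rfl)
    obtain ⟨su, hsu⟩ := Option.isSome_iff_exists.mp hszu
    obtain ⟨sv, hsv⟩ := Option.isSome_iff_exists.mp hszv
    have hER_goal : ∀ (dd : PySem.Dict PvCell PvCell),
        (∀ a b, PvER dd a b ↔ PvJoin (PvER d2) ru rv a b) →
        (∀ a b, PvER dd a b ↔ PvJoin (PvER d) u v a b) := by
      intro dd h a b
      rw [h a b, pvJoin_iff hERpres2 ru rv a b]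
      exact pvJoin_congr_pts pvER_symm pvER_trans
        (pvER_symm u ru hERu) (pvER_symm v rv hERv) a b
    have hszdom : ∀ (rt : PvCell) (s : Int) (dd : PySem.Dict PvCell PvCell),
        (∀ w, (dd.get? w).isSome = (d.get? w).isSome) → SzDom dd (sz.insert rt s) := by
      intro rt s dd hpr c hc
      rw [PySem.Dict.get?_insert]
      by_cases hcr : c = rt
      · rw [if_pos hcr]; rfl
      · rw [if_neg hcr]
        exact hsz c (by rw [← hpr c]; exact hc)
    by_cases hlt : su < sv
    · -- hang ru under rv
      have hne' : rv ≠ ru := fun h => hrr h.symm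
      obtain ⟨hinvh, hpresh, -⟩ := pvHang hinv2 hrv2 hru2 hne'
      have hERh := pvHang_ER hinv2 hrv2 hru2 hne'
      refine ⟨d2.insert ru rv, sz.insert rv (sv + su), ?_, hinvh,
        fun w => (hpresh w).trans ((hpres2 w).trans (hpres1 w)),
        hszdom rv (sv + su) (d2.insert ru rv)
          (fun w => (hpresh w).trans ((hpres2 w).trans (hpres1 w))), ?_⟩
      · simp only [ufUnion, hcond, Bool.false_eq_true, if_false, hf1, hf2,
          if_neg hrr, hsu, hsv, if_pos hlt]
      · apply hER_goal
        intro a b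
        rw [hERh a b]
        exact pvJoin_swap
    · -- hang rv under ru
      obtain ⟨hinvh, hpresh, -⟩ := pvHang hinv2 hru2 hrv2 hrr
      have hERh := pvHang_ER hinv2 hru2 hrv2 hrr
      refine ⟨d2.insert rv ru, sz.insert ru (su + sv), ?_, hinvh,
        fun w => (hpresh w).trans ((hpres2 w).trans (hpres1 w)),
        hszdom ru (su + sv) (d2.insert rv ru)
          (fun w => (hpresh w).trans ((hpres2 w).trans (hpres1 w))), ?_⟩
      · simp only [ufUnion, hcond, Bool.false_eq_true, if_false, hf1, hf2,
          if_neg hrr, hsu, hsv, if_neg hlt]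
      · exact hER_goal _ hERh

theorem pvConn_ok {d : PySem.Dict PvCell PvCell} (hinv : PvInv d) {u v : PvCell}
    (hu : (d.get? u).isSome = true) (hv : (d.get? v).isSome = true) :
    ∃ bl d2, ufConn u v d = some (bl, d2) ∧ (bl = true ↔ PvER d u v) ∧ PvInv d2 ∧
      (∀ w, (d2.get? w).isSome = (d.get? w).isSome) ∧
      (∀ a b, PvER d2 a b ↔ PvER d a b) := by
  obtain ⟨ru, d1, hf1, hru, hinv1, hsz1, hpres1, hrp1⟩ := pvFind_ok' hinv hu
  have hv1 : (d1.get? v).isSome = true := by rw [hpres1]; exact hv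
  obtain ⟨rv, d2, hf2, hrv1, hinv2, hsz2, hpres2, hrp2⟩ := pvFind_ok' hinv1 hv1
  have hrv : PvRoot d v rv := (hrp1 v rv).mp hrv1
  refine ⟨decide (ru = rv), d2, ?_, ?_, hinv2,
    fun w => (hpres2 w).trans (hpres1 w), ?_⟩
  · simp only [ufConn, hf1, hf2]
  · rw [decide_eq_true_iff]
    constructor
    · intro h; exact ⟨ru, hru, h ▸ hrv⟩
    · rintro ⟨r, h1, h2⟩
      rw [pvRoot_unique hru h1, pvRoot_unique hrv h2]
  · intro a b
    exact exists_congr fun r =>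
      and_congr ((hrp2 a r).trans (hrp1 a r)) ((hrp2 b r).trans (hrp1 b r))


theorem relabel_fold_get (oldl newl : Int) (hne : oldl ≠ newl) :
    ∀ (ks : List PvCell) (acc : PySem.Dict PvCell Int) (c : PvCell),
    ((ks.foldl (fun acc c => if acc.get? c = some oldl then acc.insert c newl else acc) acc).get? c)
      = if c ∈ ks ∧ acc.get? c = some oldl then some newl else acc.get? c := by
  intro ks
  induction ks with
  | nil => intro acc c; simp
  | cons k ks ih =>
    intro acc c
    simp only [List.foldl_cons]
    rw [ih]
    by_cases hck : c = k
    · by_cases hacc : acc.get? c = some oldl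
      · rw [if_pos (show acc.get? k = some oldl by rw [← hck]; exact hacc)]
        have hg : (acc.insert k newl).get? c = some newl := by
          rw [PySem.Dict.get?_insert, if_pos hck]
        rw [hg]
        rw [if_neg (fun h => hne (Option.some_inj.mp h.2).symm)]
        rw [if_pos ⟨by rw [hck]; exact List.mem_cons_self, hacc⟩]
      · rw [if_neg (show ¬ acc.get? k = some oldl by rw [← hck]; exact hacc)]
        rw [if_neg (fun h => hacc h.2)]
        rw [if_neg (fun h => hacc h.2)]
    · by_cases haccK : acc.get? k = some oldl
      · rw [if_pos haccK]
        have hg : (acc.insert k newl).get? c = acc.get? c := by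
          rw [PySem.Dict.get?_insert, if_neg hck]
        rw [hg]
        have hmem : (c ∈ k :: ks) = (c ∈ ks) := by
          simp [List.mem_cons, hck]
        by_cases hc2 : c ∈ ks ∧ acc.get? c = some oldl
        · rw [if_pos hc2, if_pos ⟨List.mem_cons_of_mem k hc2.1, hc2.2⟩]
        · rw [if_neg hc2, if_neg (fun h => hc2 ⟨by rcases List.mem_cons.mp h.1 with h' | h'; exact absurd h' hck; exact h', h.2⟩)]
      · rw [if_neg haccK]
        by_cases hc2 : c ∈ ks ∧ acc.get? c = some oldl
        · rw [if_pos hc2, if_pos ⟨List.mem_cons_of_mem k hc2.1, hc2.2⟩]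
        · rw [if_neg hc2, if_neg (fun h => hc2 ⟨by rcases List.mem_cons.mp h.1 with h' | h'; exact absurd h' hck; exact h', h.2⟩)]

theorem altRelabel_get {oldl newl : Int} (hne : oldl ≠ newl) (lbl : PySem.Dict PvCell Int)
    (c : PvCell) :
    (altRelabel oldl newl lbl).get? c
      = if lbl.get? c = some oldl then some newl else lbl.get? c := by
  unfold altRelabel
  rw [relabel_fold_get oldl newl hne lbl.keys lbl c]
  by_cases h : lbl.get? c = some oldl
  · rw [if_pos h, if_pos ?_]
    refine ⟨?_, h⟩
    by_contra hm
    rw [← PySem.Dict.get?_eq_none_iff_not_mem_keys] at hm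
    rw [hm] at h
    exact absurd h (by simp)
  · rw [if_neg (fun hh => h hh.2), if_neg h]

theorem altMerge_nonkey {cell nb : PvCell} {lbl : PySem.Dict PvCell Int}
    (hnb : lbl.get? nb = none) : altMerge cell nb lbl = lbl := by
  simp [altMerge, hnb]

theorem altMerge_ok {cell nb : PvCell} {lbl : PySem.Dict PvCell Int}
    (hcell : (lbl.get? cell).isSome = true) (hnb : (lbl.get? nb).isSome = true) :
    (∀ c, ((altMerge cell nb lbl).get? c).isSome = (lbl.get? c).isSome) ∧
    (∀ (Q : Int → Prop), (∀ c l, lbl.get? c = some l → Q l) →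
      (∀ c l, (altMerge cell nb lbl).get? c = some l → Q l)) ∧
    (∀ a b, LblEq (altMerge cell nb lbl) a b ↔ PvJoin (LblEq lbl) cell nb a b) := by
  obtain ⟨newl, hcl⟩ := Option.isSome_iff_exists.mp hcell
  obtain ⟨oldl, hnl⟩ := Option.isSome_iff_exists.mp hnb
  have hmerge : altMerge cell nb lbl
      = if oldl ≠ newl then altRelabel oldl newl lbl else lbl := by
    simp [altMerge, hcl, hnl]
  have hLcell : ∀ x, LblEq lbl x cell ↔ lbl.get? x = some newl := by
    intro x
    constructor
    · rintro ⟨l, hx, hc⟩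
      rw [hcl] at hc
      rw [Option.some_inj.mp hc]
      exact hx
    · intro h; exact ⟨newl, h, hcl⟩
  have hLnb : ∀ x, LblEq lbl x nb ↔ lbl.get? x = some oldl := by
    intro x
    constructor
    · rintro ⟨l, hx, hc⟩
      rw [hnl] at hc
      rw [Option.some_inj.mp hc]
      exact hx
    · intro h; exact ⟨oldl, h, hnl⟩
  by_cases heq : oldl = newl
  · rw [hmerge, if_neg (fun h => h heq)]
    refine ⟨fun c => rfl, fun Q hQ => hQ, ?_⟩
    intro a b
    have hcn : LblEq lbl cell nb := ⟨newl, hcl, by rw [hnl, heq]⟩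
    exact (pvJoin_collapse lblEq_symm lblEq_trans hcn a b).symm
  · rw [hmerge, if_pos heq]
    have hget := altRelabel_get heq lbl
    refine ⟨?_, ?_, ?_⟩
    · intro c
      rw [hget c]
      by_cases h : lbl.get? c = some oldl
      · rw [if_pos h, h]; rfl
      · rw [if_neg h]
    · intro Q hQ c l hcl'
      rw [hget c] at hcl'
      by_cases h : lbl.get? c = some oldl
      · rw [if_pos h] at hcl'
        rw [← Option.some_inj.mp hcl']
        exact hQ cell newl hcl
      · rw [if_neg h] at hcl'
        exact hQ c l hcl'
    · intro a b
      constructor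
      · rintro ⟨l, ha, hb⟩
        rw [hget a] at ha
        rw [hget b] at hb
        by_cases hga : lbl.get? a = some oldl <;> by_cases hgb : lbl.get? b = some oldl
        · exact Or.inl ⟨oldl, hga, hgb⟩
        · rw [if_pos hga] at ha
          rw [if_neg hgb] at hb
          rw [← Option.some_inj.mp ha] at hb
          exact Or.inr (Or.inr ⟨(hLnb a).mpr hga, (hLcell b).mpr hb⟩)
        · rw [if_neg hga] at ha
          rw [if_pos hgb] at hb
          rw [← Option.some_inj.mp hb] at ha
          exact Or.inr (Or.inl ⟨(hLcell a).mpr ha, (hLnb b).mpr hgb⟩)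
        · rw [if_neg hga] at ha
          rw [if_neg hgb] at hb
          exact Or.inl ⟨l, ha, hb⟩
      · rintro (⟨l, ha, hb⟩ | ⟨hac, hbn⟩ | ⟨han, hbc⟩)
        · by_cases hl : l = oldl
          · refine ⟨newl, ?_, ?_⟩
            · rw [hget a, if_pos (by rw [← hl]; exact ha)]
            · rw [hget b, if_pos (by rw [← hl]; exact hb)]
          · refine ⟨l, ?_, ?_⟩
            · rw [hget a, if_neg (fun h => hl (by rw [ha] at h; exact Option.some_inj.mp h))]
              exact ha
            · rw [hget b, if_neg (fun h => hl (by rw [hb] at h; exact Option.some_inj.mp h))]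
              exact hb
        · have h1 := (hLcell a).mp hac
          have h2 := (hLnb b).mp hbn
          refine ⟨newl, ?_, ?_⟩
          · rw [hget a, if_neg (fun h => heq (by rw [h1] at h; exact (Option.some_inj.mp h).symm))]
            exact h1
          · rw [hget b, if_pos h2]
        · have h1 := (hLnb a).mp han
          have h2 := (hLcell b).mp hbc
          refine ⟨newl, ?_, ?_⟩
          · rw [hget a, if_pos h1]
          · rw [hget b, if_neg (fun h => heq (by rw [h2] at h; exact (Option.some_inj.mp h).symm))]
            exact h2

theorem lblAdd {lbl : PySem.Dict PvCell Int} {c : PvCell} {nxt : Int}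
    (hc : lbl.get? c = none) (hbound : ∀ c' l, lbl.get? c' = some l → l < nxt) :
    ∀ a b, LblEq (lbl.insert c nxt) a b ↔ (LblEq lbl a b ∨ (a = c ∧ b = c)) := by
  intro a b
  have hget : ∀ w, (lbl.insert c nxt).get? w = if w = c then some nxt else lbl.get? w :=
    fun w => PySem.Dict.get?_insert lbl c w nxt
  constructor
  · rintro ⟨l, ha, hb⟩
    rw [hget a] at ha
    rw [hget b] at hb
    by_cases hac : a = c <;> by_cases hbc : b = c
    · exact Or.inr ⟨hac, hbc⟩
    · rw [if_pos hac] at ha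
      rw [if_neg hbc] at hb
      rw [← Option.some_inj.mp ha] at hb
      exact absurd (hbound b nxt hb) (lt_irrefl nxt)
    · rw [if_neg hac] at ha
      rw [if_pos hbc] at hb
      rw [← Option.some_inj.mp hb] at ha
      exact absurd (hbound a nxt ha) (lt_irrefl nxt)
    · rw [if_neg hac] at ha
      rw [if_neg hbc] at hb
      exact Or.inl ⟨l, ha, hb⟩
  · rintro (⟨l, ha, hb⟩ | ⟨hac, hbc⟩)
    · refine ⟨l, ?_, ?_⟩
      · rw [hget a, if_neg (fun h => by rw [h, hc] at ha; exact absurd ha (by simp))]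
        exact ha
      · rw [hget b, if_neg (fun h => by rw [h, hc] at hb; exact absurd hb (by simp))]
        exact hb
    · refine ⟨nxt, ?_, ?_⟩
      · rw [hget a, if_pos hac]
      · rw [hget b, if_pos hbc]


theorem sync_step {d : PySem.Dict PvCell PvCell} {sz : PySem.Dict PvCell Int}
    {lbl : PySem.Dict PvCell Int} {nxt : Int} (cell nb : PvCell)
    (hinv : PvInv d) (hszd : SzDom d sz)
    (hkeys : ∀ c, (d.get? c).isSome = (lbl.get? c).isSome)
    (hER : ∀ a b, PvER d a b ↔ LblEq lbl a b)
    (hbound : ∀ c l, lbl.get? c = some l → l < nxt)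
    (hcell : (d.get? cell).isSome = true) :
    ∃ d' sz', ufUnion cell nb (d, sz) = some (d', sz') ∧ PvInv d' ∧ SzDom d' sz' ∧
      (∀ c, (d'.get? c).isSome = ((altMerge cell nb lbl).get? c).isSome) ∧
      (∀ a b, PvER d' a b ↔ LblEq (altMerge cell nb lbl) a b) ∧
      (∀ c l, (altMerge cell nb lbl).get? c = some l → l < nxt) ∧
      (∀ w, (d'.get? w).isSome = (d.get? w).isSome) := by
  by_cases hnb : (d.get? nb).isSome = true
  · have hnbl : (lbl.get? nb).isSome = true := by rw [← hkeys]; exact hnb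
    have hcelll : (lbl.get? cell).isSome = true := by rw [← hkeys]; exact hcell
    obtain ⟨hpresM, hQ, hLbl⟩ := altMerge_ok hcelll hnbl
    obtain ⟨d', sz', hun, hinv', hpres', hszd', hER'⟩ := pvUnion_ok hinv hszd hcell hnb
    refine ⟨d', sz', hun, hinv', hszd', ?_, ?_, hQ _ hbound, hpres'⟩
    · intro c; rw [hpres' c, hkeys c, ← hpresM c]
    · intro a b
      rw [hER' a b, hLbl a b]
      exact pvJoin_iff hER cell nb a b
  · have hnbn : d.get? nb = none := by
      cases h : d.get? nb with
      | none => rfl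
      | some _ => rw [h] at hnb; simp at hnb
    have hnbl : lbl.get? nb = none := by
      have h := hkeys nb
      rw [hnbn] at h
      cases h' : lbl.get? nb with
      | none => rfl
      | some _ => rw [h'] at h; simp at h
    rw [altMerge_nonkey hnbl]
    exact ⟨d, sz, pvUnion_skip hnbn, hinv, hszd, hkeys, hER, hbound, fun _ => rfl⟩

theorem loop_eq : ∀ (roads : List PvCell) (soln nxt : Int)
    (d : PySem.Dict PvCell PvCell) (sz : PySem.Dict PvCell Int)
    (lbl : PySem.Dict PvCell Int) (src dst : PvCell),
    PvInv d → SzDom d sz →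
    (∀ c, (d.get? c).isSome = (lbl.get? c).isSome) →
    (∀ a b, PvER d a b ↔ LblEq lbl a b) →
    (∀ c l, lbl.get? c = some l → l < nxt) →
    (d.get? src).isSome = true → (d.get? dst).isSome = true →
    solveLoop src dst roads soln (d, sz) = altLoop src dst roads soln nxt lbl := by
  intro roads
  induction roads with
  | nil => intro soln nxt d sz lbl src dst _ _ _ _ _ _ _; rfl
  | cons cell rest ih =>
    obtain ⟨x, y⟩ := cell
    intro soln nxt d sz lbl src dst hinv hszd hkeys hER hbound hsrc hdst
    have key : ∃ d₁ sz₁ lbl₁ nxt₁,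
        ufAdd (x, y) (d, sz) = (d₁, sz₁) ∧
        (if (lbl.get? (x, y)).isSome then ((lbl, nxt) : PySem.Dict PvCell Int × Int)
          else (lbl.insert (x, y) nxt, nxt + 1)) = (lbl₁, nxt₁) ∧
        PvInv d₁ ∧ SzDom d₁ sz₁ ∧ (∀ c, (d₁.get? c).isSome = (lbl₁.get? c).isSome) ∧
        (∀ a b, PvER d₁ a b ↔ LblEq lbl₁ a b) ∧
        (∀ c l, lbl₁.get? c = some l → l < nxt₁) ∧
        (d₁.get? src).isSome = true ∧ (d₁.get? dst).isSome = true ∧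
        (d₁.get? (x, y)).isSome = true := by
      by_cases hmem : (d.get? (x, y)).isSome = true
      · have hmemL : (lbl.get? (x, y)).isSome = true := by rw [← hkeys]; exact hmem
        refine ⟨d, sz, lbl, nxt, ?_, ?_, hinv, hszd, hkeys, hER, hbound, hsrc, hdst, hmem⟩
        · simp only [ufAdd]; rw [if_pos hmem]
        · rw [if_pos hmemL]
      · have hdn : d.get? (x, y) = none := by
          cases h : d.get? (x, y) with
          | none => rfl
          | some _ => rw [h] at hmem; simp at hmem
        have hln : lbl.get? (x, y) = none := by
          have h := hkeys (x, y)
          rw [hdn] at h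
          cases h' : lbl.get? (x, y) with
          | none => rfl
          | some _ => rw [h'] at h; simp at h
        obtain ⟨hinvA, _⟩ := pvAddRoot hinv hdn
        have hERA := pvAddRoot_ER hinv hdn
        have hLA := lblAdd hln hbound
        have hmemB : ¬ ((lbl.get? (x, y)).isSome = true) := by rw [hln]; simp
        refine ⟨d.insert (x, y) (x, y), sz.insert (x, y) 1, lbl.insert (x, y) nxt, nxt + 1,
          ?_, ?_, hinvA, ?_, ?_, ?_, ?_, ?_, ?_, ?_⟩
        · simp only [ufAdd]; rw [if_neg hmem]
        · rw [if_neg hmemB]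
        · intro c hc
          rw [PySem.Dict.get?_insert]
          by_cases hcx : c = (x, y)
          · rw [if_pos hcx]; rfl
          · rw [if_neg hcx]
            rw [PySem.Dict.get?_insert, if_neg hcx] at hc
            exact hszd c hc
        · intro c
          rw [PySem.Dict.get?_insert, PySem.Dict.get?_insert]
          by_cases hcx : c = (x, y)
          · rw [if_pos hcx, if_pos hcx]; rfl
          · rw [if_neg hcx, if_neg hcx]; exact hkeys c
        · intro a b
          rw [hERA a b, hLA a b]
          exact or_congr (hER a b) Iff.rfl
        · intro c l h
          rw [PySem.Dict.get?_insert] at h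
          by_cases hcx : c = (x, y)
          · rw [if_pos hcx] at h
            have : l = nxt := (Option.some_inj.mp h).symm
            omega
          · rw [if_neg hcx] at h
            have := hbound c l h
            omega
        · rw [PySem.Dict.get?_insert]
          by_cases hcx : src = (x, y)
          · rw [if_pos hcx]; rfl
          · rw [if_neg hcx]; exact hsrc
        · rw [PySem.Dict.get?_insert]
          by_cases hcx : dst = (x, y)
          · rw [if_pos hcx]; rfl
          · rw [if_neg hcx]; exact hdst
        · rw [PySem.Dict.get?_insert, if_pos rfl]; rfl
    obtain ⟨d₁, sz₁, lbl₁, nxt₁, hA1, hB1, hi1, hs1, hk1, he1, hb1, hsrc1, hdst1, hc1⟩ := key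
    obtain ⟨d₂, sz₂, hu2, hi2, hs2, hk2, he2, hb2, hp2⟩ :=
      sync_step (x, y) (x, y + 1) hi1 hs1 hk1 he1 hb1 hc1
    have hc2 : (d₂.get? (x, y)).isSome = true := by rw [hp2]; exact hc1
    obtain ⟨d₃, sz₃, hu3, hi3, hs3, hk3, he3, hb3, hp3⟩ :=
      sync_step (x, y) (x, y - 1) hi2 hs2 hk2 he2 hb2 hc2
    have hc3 : (d₃.get? (x, y)).isSome = true := by rw [hp3]; exact hc2
    obtain ⟨d₄, sz₄, hu4, hi4, hs4, hk4, he4, hb4, hp4⟩ :=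
      sync_step (x, y) (x + 1, y) hi3 hs3 hk3 he3 hb3 hc3
    have hc4 : (d₄.get? (x, y)).isSome = true := by rw [hp4]; exact hc3
    obtain ⟨d₅, sz₅, hu5, hi5, hs5, hk5, he5, hb5, hp5⟩ :=
      sync_step (x, y) (x - 1, y) hi4 hs4 hk4 he4 hb4 hc4
    have hsrc5 : (d₅.get? src).isSome = true := by
      rw [hp5, hp4, hp3, hp2]; exact hsrc1
    have hdst5 : (d₅.get? dst).isSome = true := by
      rw [hp5, hp4, hp3, hp2]; exact hdst1
    set lbl₅ := altMerge (x, y) (x - 1, y) (altMerge (x, y) (x + 1, y)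
      (altMerge (x, y) (x, y - 1) (altMerge (x, y) (x, y + 1) lbl₁))) with hlbl₅
    obtain ⟨bl, dc, hconn, hbl, hic, hpc, hec⟩ := pvConn_ok hi5 hsrc5 hdst5
    have hsrcL : (lbl₅.get? src).isSome = true := by rw [← hk5]; exact hsrc5
    have hcond : (bl = true) ↔ (lbl₅.get? src = lbl₅.get? dst) := by
      rw [hbl, he5 src dst]
      constructor
      · rintro ⟨l, h1, h2⟩; rw [h1, h2]
      · intro h
        obtain ⟨l, hl⟩ := Option.isSome_iff_exists.mp hsrcL
        exact ⟨l, hl, by rw [← h]; exact hl⟩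
    -- unfold both loops one step
    show solveLoop src dst ((x, y) :: rest) soln (d, sz)
      = altLoop src dst ((x, y) :: rest) soln nxt lbl
    simp only [solveLoop, altLoop, hA1, hB1, hu2, hu3, hu4, hu5, hconn]
    rw [← hlbl₅]
    by_cases hb : bl = true
    · rw [hb]
      rw [if_pos (hcond.mp hb)]
      simp
    · have hbf : bl = false := by
        cases bl
        · rfl
        · exact absurd rfl hb
      rw [hbf]
      rw [if_neg (fun h => hb (hcond.mpr h))]
      simp only [Bool.false_eq_true, if_false]
      apply ih
      · exact hic
      · intro c hc
        exact hs5 c (by rw [← hpc c]; exact hc)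
      · intro c
        rw [hpc c]; exact hk5 c
      · intro a b
        rw [hec a b]; exact he5 a b
      · exact hb5
      · rw [hpc]; exact hsrc5
      · rw [hpc]; exact hdst5

-- ===== VERDICT (by name: the statement is the Claim_ definition above) =====
theorem emptyER (a b : PvCell) : ¬ PvER PySem.Dict.empty a b := by
  rintro ⟨r, ⟨hr, _⟩, _⟩
  rw [PySem.Dict.get?_empty] at hr
  exact absurd hr (by simp)

theorem solve_spec : Claim_equal_solve := by
  unfold Claim_equal_solve Spec_solve
  intro sx sy ex ey roads _
  simp only [solve, solve_alt]
  by_cases hdist : (sx - ex) ^ 2 + (sy - ey) ^ 2 ≤ 1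
  · rw [if_pos hdist, if_pos hdist]
  · rw [if_neg hdist, if_neg hdist]
    have hne : ((ex, ey) : PvCell) ≠ (sx, sy) := by
      intro h
      rw [Prod.mk.injEq] at h
      obtain ⟨h1, h2⟩ := h
      apply hdist
      rw [h1, h2]
      norm_num
    have hes : PySem.Dict.empty.get? ((sx, sy) : PvCell) = (none : Option PvCell) :=
      PySem.Dict.get?_empty _
    have het : (PySem.Dict.empty.insert ((sx, sy) : PvCell) ((sx, sy) : PvCell)).get? (ex, ey) = none := by
      rw [PySem.Dict.get?_insert, if_neg hne, PySem.Dict.get?_empty]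
    have hadd : ufAdd (ex, ey) (ufAdd (sx, sy) (PySem.Dict.empty, PySem.Dict.empty))
        = (((PySem.Dict.empty.insert ((sx, sy) : PvCell) ((sx, sy) : PvCell)).insert (ex, ey) (ex, ey)),
          ((PySem.Dict.empty.insert ((sx, sy) : PvCell) (1 : Int)).insert (ex, ey) (1 : Int))) := by
      have h1 : ufAdd (sx, sy) (PySem.Dict.empty, PySem.Dict.empty)
          = ((PySem.Dict.empty.insert ((sx, sy) : PvCell) ((sx, sy) : PvCell)),
             (PySem.Dict.empty.insert ((sx, sy) : PvCell) (1 : Int))) := by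
        simp [ufAdd, hes]
      rw [h1]
      simp [ufAdd, het]
    rw [hadd]
    -- the two initial dictionaries
    set d0 := (PySem.Dict.empty.insert ((sx, sy) : PvCell) ((sx, sy) : PvCell)).insert (ex, ey) (ex, ey) with hd0
    set sz0 := (PySem.Dict.empty.insert ((sx, sy) : PvCell) (1 : Int)).insert (ex, ey) (1 : Int) with hsz0
    set lbl0 := (PySem.Dict.empty.insert ((sx, sy) : PvCell) (0 : Int)).insert (ex, ey) (1 : Int) with hlbl0
    have hgd : ∀ c, d0.get? c = if c = (ex, ey) then some (ex, ey)
        else if c = (sx, sy) then some (sx, sy) else none := by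
      intro c
      rw [hd0, PySem.Dict.get?_insert, PySem.Dict.get?_insert, PySem.Dict.get?_empty]
    have hgl : ∀ c, lbl0.get? c = if c = (ex, ey) then some 1
        else if c = (sx, sy) then some 0 else none := by
      intro c
      rw [hlbl0, PySem.Dict.get?_insert, PySem.Dict.get?_insert, PySem.Dict.get?_empty]
    have hgs : ∀ c, sz0.get? c = if c = (ex, ey) then some 1
        else if c = (sx, sy) then some 1 else none := by
      intro c
      rw [hsz0, PySem.Dict.get?_insert, PySem.Dict.get?_insert, PySem.Dict.get?_empty]
    have hinv1 : PvInv (PySem.Dict.empty.insert ((sx, sy) : PvCell) ((sx, sy) : PvCell)) := by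
      obtain ⟨h, _⟩ := pvAddRoot (d := PySem.Dict.empty)
        ⟨fun _ => 0, by
          intro u p hp
          rw [PySem.Dict.get?_empty] at hp
          exact absurd hp (by simp)⟩ hes
      exact h
    have hER1 := pvAddRoot_ER (d := PySem.Dict.empty)
      ⟨fun _ => 0, by
        intro u p hp
        rw [PySem.Dict.get?_empty] at hp
        exact absurd hp (by simp)⟩ hes
    obtain ⟨hinv0, _⟩ := pvAddRoot hinv1 het
    have hER0 := pvAddRoot_ER hinv1 het
    have hERform : ∀ a b, PvER d0 a b ↔
        ((a = (sx, sy) ∧ b = (sx, sy)) ∨ (a = (ex, ey) ∧ b = (ex, ey))) := by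
      intro a b
      rw [hd0, hER0 a b, hER1 a b]
      constructor
      · rintro ((h | h) | h)
        · exact absurd h (emptyER a b)
        · exact Or.inl h
        · exact Or.inr h
      · rintro (h | h)
        · exact Or.inl (Or.inr h)
        · exact Or.inr h
    apply loop_eq roads 0 2 d0 sz0 lbl0 (sx, sy) (ex, ey) hinv0
    · intro c hc
      rw [hgs c]
      rw [hgd c] at hc
      split_ifs with h1 h2
      · rfl
      · rfl
      · rw [if_neg h1, if_neg h2] at hc; simp at hc
    · intro c
      rw [hgd c, hgl c]
      split_ifs <;> rfl
    · intro a b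
      rw [hERform a b]
      constructor
      · rintro (⟨ha, hb⟩ | ⟨ha, hb⟩)
        · exact ⟨0, by rw [hgl, ha, if_neg (fun h => hne h.symm), if_pos rfl],
            by rw [hgl, hb, if_neg (fun h => hne h.symm), if_pos rfl]⟩
        · exact ⟨1, by rw [hgl, ha, if_pos rfl], by rw [hgl, hb, if_pos rfl]⟩
      · rintro ⟨l, ha, hb⟩
        rw [hgl a] at ha
        rw [hgl b] at hb
        by_cases h1 : a = (ex, ey) <;> by_cases h2 : b = (ex, ey)
        · exact Or.inr ⟨h1, h2⟩
        · rw [if_pos h1] at ha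
          rw [if_neg h2] at hb
          by_cases h3 : b = (sx, sy)
          · rw [if_pos h3] at hb
            exfalso
            have e1 : (1 : Int) = l := Option.some_inj.mp ha
            have e2 : (0 : Int) = l := Option.some_inj.mp hb
            omega
          · rw [if_neg h3] at hb
            exact absurd hb (by simp)
        · rw [if_neg h1] at ha
          rw [if_pos h2] at hb
          by_cases h3 : a = (sx, sy)
          · rw [if_pos h3] at ha
            exfalso
            have e1 : (0 : Int) = l := Option.some_inj.mp ha
            have e2 : (1 : Int) = l := Option.some_inj.mp hb
            omega
          · rw [if_neg h3] at ha
            exact absurd ha (by simp)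
        · rw [if_neg h1] at ha
          rw [if_neg h2] at hb
          by_cases h3 : a = (sx, sy)
          · by_cases h4 : b = (sx, sy)
            · exact Or.inl ⟨h3, h4⟩
            · rw [if_neg h4] at hb
              exact absurd hb (by simp)
          · rw [if_neg h3] at ha
            exact absurd ha (by simp)
    · intro c l h
      rw [hgl c] at h
      split_ifs at h <;> (have := Option.some_inj.mp h; omega)
    · rw [hgd, if_neg (fun h => hne h.symm), if_pos rfl]; rfl
    · rw [hgd, if_pos rfl]; rfl
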